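-- pv_equiv track=rewrite | github.com/defenceapp/defenceblocklistupdater | main.py | all_possible_regexes
-- ===== SOURCE A (Python) =====
-- COMMON_SUBS = {
--
--     "a": ("e",),
--     "e": ("a",),
--     "w": ("v",),
--     "l": ("i", "1", "t"),
--     "n": ("m",),
--     "m": ("n",),
--     "i": ("l", "1", "t"),
-- }
--
-- def all_possible_subs(domain, subs):
--     domains = set()
--     for i in range(len(domain)):
--         subdomain = domain[0:i] + domain[i+1:len(domain)]
--         domains.add(subdomain)
--         if subs > 1:
--             domains = domains.union(all_possible_subs(subdomain, subs-1))
--     return sorted(list(domains))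
--
-- def all_possible_regexes(domain, subs):
--     sub_domains = all_possible_subs(domain, subs)
--     regex_domains = []
--     for domain in sub_domains:
--         domain_with_fuzz = ".?"
--         for character in domain:
--             domain_with_fuzz += f"[{character}{''.join(COMMON_SUBS.get(character, []))}].?"
--         regex_domains.append(fr"https?://([a-z0-9\-]*\.)*(xn\-\-)?{domain_with_fuzz}(\-[a-z0-9]*)?([a-z0-9\-]*\.)*\..*")
--     return regex_domains
-- ===== SOURCE B (Python) =====
-- COMMON_SUBS = {
--     "a": ("e",),
--     "e": ("a",),
--     "w": ("v",),
--     "l": ("i", "1", "t"),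
--     "n": ("m",),
--     "m": ("n",),
--     "i": ("l", "1", "t"),
-- }
--
-- def all_possible_regexes(domain, subs):
--     # Breadth-first over deletion depths: each level holds the DISTINCT strings
--     # reachable by exactly that many single-character deletions, so nothing is
--     # ever re-expanded (A re-expands every duplicate, exponentially).
--     levels = max(1, min(subs, len(domain)))
--     seen = set()
--     frontier = {domain}
--     for _ in range(levels):
--         frontier = {s[:i] + s[i + 1:] for s in frontier for i in range(len(s))}
--         seen |= frontier
--     prefix = r"https?://([a-z0-9\-]*\.)*(xn\-\-)?.?"
--     suffix = r"(\-[a-z0-9]*)?([a-z0-9\-]*\.)*\..*"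
--     return [
--         prefix
--         + "".join(f"[{c}{''.join(COMMON_SUBS.get(c, []))}].?" for c in d)
--         + suffix
--         for d in sorted(seen)
--     ]
-- ===== Notes on version B (the rewrite author's own statement) =====
-- stated objective: faster
-- what changed: Replaced A's unmemoized recursion (which re-expands every duplicate subsequence and re-sorts at every call) by an iterative breadth-first sweep over deletion depths, keeping each depth level as a set of distinct strings and sorting once at the end.
import Mathlib
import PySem

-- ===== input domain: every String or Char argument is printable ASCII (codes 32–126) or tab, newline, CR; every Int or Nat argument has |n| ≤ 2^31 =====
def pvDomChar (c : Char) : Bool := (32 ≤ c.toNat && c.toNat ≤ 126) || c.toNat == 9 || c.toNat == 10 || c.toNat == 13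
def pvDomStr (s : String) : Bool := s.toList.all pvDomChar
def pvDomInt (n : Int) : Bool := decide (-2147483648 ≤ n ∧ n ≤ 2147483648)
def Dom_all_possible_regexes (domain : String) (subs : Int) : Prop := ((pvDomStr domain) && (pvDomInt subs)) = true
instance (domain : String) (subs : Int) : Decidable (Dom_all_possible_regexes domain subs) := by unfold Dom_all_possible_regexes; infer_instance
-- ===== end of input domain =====

-- B replaces A's unmemoized exponential recursion over deletions by a breadth-first
-- sweep over deletion depths that keeps each level as a set of distinct strings.

-- COMMON_SUBS: the module dict; each tuple of 1-char strings is represented by its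
-- joined character list (exact, since A only ever joins the tuple).
def COMMON_SUBS : PySem.Dict Char (List Char) := PySem.Dict.ofList
  [('a', ['e']), ('e', ['a']), ('w', ['v']), ('l', ['i', '1', 't']),
   ('n', ['m']), ('m', ['n']), ('i', ['l', '1', 't'])]

-- ===== PORT A =====
-- domain[0:i] + domain[i+1:len(domain)]
def aDel (s : List Char) (i : Nat) : List Char :=
  PySem.List.slice s (some (0 : Int)) (some (i : Int)) ++
    PySem.List.slice s (some ((i : Int) + 1)) (some (s.length : Int))

-- needed by the ports' termination proofs (cited in decreasing_by)
theorem aDel_eq (s : List Char) (i : Nat) : aDel s i = s.take i ++ s.drop (i + 1) := by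
  have h1 : ((i : Int) + 1) = ((i + 1 : Nat) : Int) := by push_cast; ring
  have h2 : List.take (s.length - (i + 1)) (List.drop (i + 1) s) = List.drop (i + 1) s :=
    List.take_of_length_le (by simp)
  rw [aDel, PySem.List.slice_zero_start, PySem.List.slice_to_natCast, h1,
    PySem.List.slice_natCast, h2]

theorem aDel_length_lt (s : List Char) (i : Nat) (h : i < s.length) :
    (aDel s i).length < s.length := by
  simp [aDel_eq, List.length_take, List.length_drop]; omega

mutual
-- def all_possible_subs(domain, subs)
def all_possible_subs_A (domain : List Char) (subs : Int) : List (List Char) :=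
  PySem.List.sorted
    (apsA_loop domain subs (List.range domain.length).attach PySem.Set.empty)
    (fun x => x) false
termination_by (domain.length, 1, 0)

-- the 'for i in range(len(domain))' loop of all_possible_subs
def apsA_loop (domain : List Char) (subs : Int)
    (l : List {i // i ∈ List.range domain.length}) (domains : PySem.Set (List Char)) :
    PySem.Set (List Char) :=
  match l with
  | [] => domains
  | ⟨i, _⟩ :: rest =>
      let subdomain := aDel domain i
      let domains := domains.add subdomain
      let domains :=
        if subs > 1 then domains.union (all_possible_subs_A subdomain (subs - 1))
        else domains
      apsA_loop domain subs rest domains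
termination_by (domain.length, 0, l.length)
decreasing_by
  · exact Prod.Lex.left _ _ (aDel_length_lt domain i (List.mem_range.mp ‹i ∈ List.range domain.length›))
  · simp_wf
    exact Prod.Lex.right _ (Prod.Lex.right _ (Nat.lt_succ_self _))
end

def all_possible_regexes (domain : String) (subs : Int) : List String :=
  let sub_domains := all_possible_subs_A domain.toList subs
  sub_domains.foldl
    (fun regex_domains d =>
      let domain_with_fuzz :=
        d.foldl (fun acc c => acc ++ (('[' :: c :: COMMON_SUBS.getD c []) ++ [']', '.', '?']))
          ['.', '?']
      regex_domains ++
        [String.ofList ("https?://([a-z0-9\\-]*\\.)*(xn\\-\\-)?".toList ++ domain_with_fuzz ++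
          "(\\-[a-z0-9]*)?([a-z0-9\\-]*\\.)*\\..*".toList)])
    []

-- ===== PORT B =====
-- s[:i] + s[i+1:]
def bDel (s : List Char) (i : Nat) : List Char :=
  PySem.List.slice s none (some (i : Int)) ++ PySem.List.slice s (some ((i : Int) + 1)) none

-- one BFS level: {s[:i]+s[i+1:] for s in frontier for i in range(len(s))}
def bStep (frontier : PySem.Set (List Char)) : PySem.Set (List Char) :=
  PySem.Set.ofList (frontier.flatMap (fun s => (List.range s.length).map (fun i => bDel s i)))

-- for _ in range(levels): frontier = …; seen |= frontier
def bLoop : Nat → PySem.Set (List Char) → PySem.Set (List Char) → PySem.Set (List Char)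
  | 0, seen, _ => seen
  | k + 1, seen, frontier =>
      let frontier' := bStep frontier
      bLoop k (seen.union frontier') frontier'

def all_possible_regexes_alt (domain : String) (subs : Int) : List String :=
  let levels := max 1 (min subs (domain.toList.length : Int))
  let seen := bLoop levels.toNat PySem.Set.empty (PySem.Set.ofList [domain.toList])
  (PySem.List.sorted seen (fun x => x) false).map
    (fun d =>
      String.ofList ("https?://([a-z0-9\\-]*\\.)*(xn\\-\\-)?.?".toList ++
        d.flatMap (fun c => '[' :: c :: COMMON_SUBS.getD c [] ++ [']', '.', '?']) ++
        "(\\-[a-z0-9]*)?([a-z0-9\\-]*\\.)*\\..*".toList))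

-- ===== PRECONDITION & SPEC =====
def Spec_all_possible_regexes (domain : String) (subs : Int) (out : List String) : Prop := out = all_possible_regexes_alt domain subs
instance (domain : String) (subs : Int) (out : List String) : Decidable (Spec_all_possible_regexes domain subs out) := by unfold Spec_all_possible_regexes; infer_instance

-- ===== CLAIM (what is proved, stated in full; the proofs are below) =====
def Claim_equal_all_possible_regexes : Prop := ∀ (domain : String) (subs : Int), Dom_all_possible_regexes domain subs → Spec_all_possible_regexes domain subs (all_possible_regexes domain subs)

-- ===== LEMMAS AND PROOFS =====

-- B's slice, reduced to take/drop
theorem bDel_eq (s : List Char) (i : Nat) : bDel s i = s.take i ++ s.drop (i + 1) := by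
  have h1 : ((i : Int) + 1) = ((i + 1 : Nat) : Int) := by push_cast; ring
  rw [bDel, PySem.List.slice_to_natCast, h1, PySem.List.slice_from_natCast]

-- x is reachable from s by exactly k single-character deletions
def Reach : Nat → List Char → List Char → Prop
  | 0, s, t => t = s
  | k + 1, s, t => ∃ i, i < s.length ∧ Reach k (s.take i ++ s.drop (i + 1)) t

theorem reach_le (k : Nat) (s t : List Char) (h : Reach k s t) : k ≤ s.length := by
  induction k generalizing s with
  | zero => omega
  | succ k ih =>
    obtain ⟨i, hi, hr⟩ := h
    have := ih _ hr
    simp only [List.length_append, List.length_take, List.length_drop] at this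
    omega

-- membership in A's inner for-loop accumulator
theorem mem_apsA_loop (s : List Char) (subs : Int)
    (l : List {i // i ∈ List.range s.length}) (acc : PySem.Set (List Char)) (x : List Char) :
    x ∈ apsA_loop s subs l acc ↔
      x ∈ acc ∨ ∃ p ∈ l, (x = aDel s p.1 ∨ (subs > 1 ∧ x ∈ all_possible_subs_A (aDel s p.1) (subs - 1))) := by
  induction l generalizing acc with
  | nil => simp [apsA_loop]
  | cons p rest ih =>
    obtain ⟨i, hi⟩ := p
    rw [apsA_loop]
    by_cases hs : subs > 1
    · simp only [hs, if_true, true_and, ih, PySem.Set.mem_union, PySem.Set.mem_add,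
        List.mem_cons]
      constructor
      · rintro (((h | h) | h) | ⟨q, hq, h⟩)
        · exact Or.inl h
        · exact Or.inr ⟨⟨i, hi⟩, Or.inl rfl, Or.inl h⟩
        · exact Or.inr ⟨⟨i, hi⟩, Or.inl rfl, Or.inr h⟩
        · exact Or.inr ⟨q, Or.inr hq, h⟩
      · rintro (h | ⟨q, (rfl | hq), h⟩)
        · exact Or.inl (Or.inl (Or.inl h))
        · rcases h with h | h
          · exact Or.inl (Or.inl (Or.inr h))
          · exact Or.inl (Or.inr h)
        · exact Or.inr ⟨q, hq, h⟩
    · simp only [hs, if_false, false_and, or_false, ih, PySem.Set.mem_add, List.mem_cons]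
      constructor
      · rintro ((h | h) | ⟨q, hq, h⟩)
        · exact Or.inl h
        · exact Or.inr ⟨⟨i, hi⟩, Or.inl rfl, h⟩
        · exact Or.inr ⟨q, Or.inr hq, h⟩
      · rintro (h | ⟨q, (rfl | hq), h⟩)
        · exact Or.inl (Or.inl h)
        · exact Or.inl (Or.inr h)
        · exact Or.inr ⟨q, hq, h⟩

-- A's recursion computes exactly the strings reachable by 1..max(1,subs) deletions
theorem mem_apsA (s : List Char) (subs : Int) (x : List Char) :
    x ∈ all_possible_subs_A s subs ↔
      ∃ k : Nat, 1 ≤ k ∧ (k : Int) ≤ max 1 subs ∧ Reach k s x := by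
  rw [all_possible_subs_A, PySem.List.mem_sorted, mem_apsA_loop]
  simp only [PySem.Set.empty, List.not_mem_nil, false_or, List.mem_attach, true_and]
  constructor
  · rintro ⟨⟨i, hi⟩, h | ⟨hs, h⟩⟩
    · refine ⟨1, le_refl 1, by omega, i, List.mem_range.mp hi, ?_⟩
      rw [aDel_eq] at h
      exact h
    · rw [mem_apsA (aDel s i) (subs - 1) x] at h
      obtain ⟨k, hk1, hkb, hr⟩ := h
      refine ⟨k + 1, by omega, by omega, i, List.mem_range.mp hi, ?_⟩
      rw [aDel_eq] at hr
      exact hr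
  · rintro ⟨k, hk1, hkb, hr⟩
    match k, hr with
    | 1, ⟨i, hilen, hr0⟩ =>
      refine ⟨⟨i, List.mem_range.mpr hilen⟩, Or.inl ?_⟩
      rw [aDel_eq]
      exact hr0
    | k'' + 2, ⟨i, hilen, hr'⟩ =>
      have hs : subs > 1 := by omega
      refine ⟨⟨i, List.mem_range.mpr hilen⟩, Or.inr ⟨hs, ?_⟩⟩
      rw [mem_apsA (aDel s i) (subs - 1) x]
      refine ⟨k'' + 1, by omega, by omega, ?_⟩
      rw [aDel_eq]
      exact hr'
termination_by s.length
decreasing_by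
  · exact aDel_length_lt s i (List.mem_range.mp hi)
  · exact aDel_length_lt s i hilen

-- one BFS level = one deletion applied to each frontier string
theorem mem_bStep (frontier : PySem.Set (List Char)) (x : List Char) :
    x ∈ bStep frontier ↔ ∃ f ∈ frontier, ∃ i, i < f.length ∧ x = f.take i ++ f.drop (i + 1) := by
  rw [bStep, PySem.Set.mem_ofList]
  simp only [List.mem_flatMap, List.mem_map, List.mem_range, bDel_eq]
  constructor
  · rintro ⟨f, hf, i, hi, rfl⟩
    exact ⟨f, hf, i, hi, rfl⟩
  · rintro ⟨f, hf, i, hi, rfl⟩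
    exact ⟨f, hf, i, hi, rfl⟩

theorem step_reach (frontier : PySem.Set (List Char)) (x : List Char) (j : Nat) :
    (∃ g ∈ bStep frontier, Reach j g x) ↔ ∃ f ∈ frontier, Reach (j + 1) f x := by
  constructor
  · rintro ⟨g, hg, hr⟩
    rw [mem_bStep] at hg
    obtain ⟨f, hf, i, hi, rfl⟩ := hg
    exact ⟨f, hf, i, hi, hr⟩
  · rintro ⟨f, hf, i, hi, hr⟩
    exact ⟨_, (mem_bStep frontier _).mpr ⟨f, hf, i, hi, rfl⟩, hr⟩

-- BFS loop invariant
theorem mem_bLoop (k : Nat) (seen frontier : PySem.Set (List Char)) (x : List Char) :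
    x ∈ bLoop k seen frontier ↔
      x ∈ seen ∨ ∃ j, 1 ≤ j ∧ j ≤ k ∧ ∃ f ∈ frontier, Reach j f x := by
  induction k generalizing seen frontier with
  | zero =>
    rw [bLoop]
    constructor
    · exact Or.inl
    · rintro (h | ⟨j, hj1, hj0, -⟩)
      · exact h
      · omega
  | succ k ih =>
    rw [bLoop]
    rw [ih, PySem.Set.mem_union]
    constructor
    · rintro ((h | h) | ⟨j, hj1, hjk, g, hg, hr⟩)
      · exact Or.inl h
      · have := (step_reach frontier x 0).mp ⟨x, h, rfl⟩
        exact Or.inr ⟨1, by omega, by omega, this⟩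
      · have := (step_reach frontier x j).mp ⟨g, hg, hr⟩
        exact Or.inr ⟨j + 1, by omega, by omega, this⟩
    · rintro (h | ⟨j, hj1, hjk, f, hf, hr⟩)
      · exact Or.inl (Or.inl h)
      · match j, hj1, hr with
        | 1, _, hr =>
          obtain ⟨g, hg, hr0⟩ := (step_reach frontier x 0).mpr ⟨f, hf, hr⟩
          rw [Reach] at hr0
          exact Or.inl (Or.inr (hr0 ▸ hg))
        | j'' + 2, _, hr =>
          obtain ⟨g, hg, hrg⟩ := (step_reach frontier x (j'' + 1)).mpr ⟨f, hf, hr⟩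
          exact Or.inr ⟨j'' + 1, by omega, by omega, g, hg, hrg⟩

theorem nodup_apsA_loop (s : List Char) (subs : Int)
    (l : List {i // i ∈ List.range s.length}) (acc : PySem.Set (List Char))
    (h : List.Nodup acc) : List.Nodup (apsA_loop s subs l acc) := by
  induction l generalizing acc with
  | nil => rw [apsA_loop]; exact h
  | cons p rest ih =>
    obtain ⟨i, hi⟩ := p
    rw [apsA_loop]
    by_cases hs : subs > 1
    · simp only [hs, if_true]
      exact ih _ (PySem.Set.nodup_union _ _ (PySem.Set.nodup_add _ _ h))
    · simp only [hs, if_false]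
      exact ih _ (PySem.Set.nodup_add _ _ h)

theorem nodup_bLoop (k : Nat) (seen frontier : PySem.Set (List Char))
    (h : List.Nodup seen) : List.Nodup (bLoop k seen frontier) := by
  induction k generalizing seen frontier with
  | zero => rw [bLoop]; exact h
  | succ k ih => exact ih _ _ (PySem.Set.nodup_union _ _ h)

-- the two accumulated sets hold the same strings
theorem sets_perm (s : List Char) (subs : Int) :
    (apsA_loop s subs (List.range s.length).attach PySem.Set.empty).Perm
      (bLoop (max 1 (min subs (s.length : Int))).toNat PySem.Set.empty (PySem.Set.ofList [s])) := by
  refine (List.perm_ext_iff_of_nodup (nodup_apsA_loop s subs _ _ List.nodup_nil)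
    (nodup_bLoop _ _ _ List.nodup_nil)).mpr fun x => ?_
  have hA : x ∈ apsA_loop s subs (List.range s.length).attach [] ↔
      x ∈ all_possible_subs_A s subs := by
    rw [all_possible_subs_A, PySem.List.mem_sorted]; exact Iff.rfl
  rw [hA, mem_apsA, mem_bLoop]
  simp only [List.not_mem_nil, false_or, PySem.Set.mem_ofList, List.mem_singleton]
  constructor
  · rintro ⟨k, hk1, hkb, hr⟩
    have hkl := reach_le k s x hr
    exact ⟨k, hk1, by omega, s, rfl, hr⟩
  · rintro ⟨j, hj1, hjM, f, rfl, hr⟩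
    exact ⟨j, hj1, by omega, hr⟩

-- sorting is invariant under rearrangement (bridges the LT/Decidable instances of the
-- ports to the LinearOrder instances of PySem.List.sorted_id_eq_sorted_id_iff_perm)
theorem sorted_inst_congr (xs : List (List Char)) :
    PySem.List.sorted xs (fun x => x) false =
      @PySem.List.sorted (List Char) (List Char)
        ((inferInstance : LinearOrder (List Char)).toPartialOrder.toLT)
        ((inferInstance : LinearOrder (List Char)).toDecidableLT) xs (fun x => x) false := by
  have h : (fun (a b : List Char) => a.decidableLT b) =
      (inferInstance : LinearOrder (List Char)).toDecidableLT := by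
    funext a b; exact Subsingleton.elim _ _
  rw [← h]

theorem sorted_congr_perm (xs ys : List (List Char)) (hp : xs.Perm ys) :
    PySem.List.sorted xs (fun x => x) false = PySem.List.sorted ys (fun x => x) false := by
  rw [sorted_inst_congr, sorted_inst_congr]
  exact (PySem.List.sorted_id_eq_sorted_id_iff_perm _ _).mpr hp

-- ===== VERDICT (by name: the statement is the Claim_ definition above) =====
theorem all_possible_regexes_spec : Claim_equal_all_possible_regexes := by
  intro domain subs _
  show all_possible_regexes domain subs = all_possible_regexes_alt domain subs
  rw [all_possible_regexes, all_possible_regexes_alt]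
  have hsort := sorted_congr_perm _ _ (sets_perm domain.toList subs)
  rw [all_possible_subs_A, hsort]
  rw [PySem.List.foldl_append_singleton_eq_map]
  simp only [List.nil_append]
  apply List.map_congr_left
  intro d _
  rw [PySem.List.foldl_append_eq_flatMap]
  have hpre : "https?://([a-z0-9\\-]*\\.)*(xn\\-\\-)?".toList ++ ['.', '?'] =
      "https?://([a-z0-9\\-]*\\.)*(xn\\-\\-)?.?".toList := by decide
  rw [← List.append_assoc, hpre]
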